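-- pv_equiv track=rewrite | github.com/pypi-data/pypi-mirror-347 | packages/ahmedelsany12-pda/ahmedelsany12_pda-1.1.3.tar.gz/ahmedelsany12_pda-1.1.3/src/pda_anbn/__init__.py | is_anbn
-- ===== SOURCE A (Python) =====
-- def is_anbn(s):
--     """
--     Simulates a PDA to check if a string is accepted by the language a^n b^n (n >= 0).
--     Returns True if accepted, False otherwise.
--     """
--     stack = []
--     i = 0
--     n = len(s)
--
--     # Push 'A' for each 'a'
--     while i < n and s[i] == 'a':
--         stack.append('A')
--         i += 1
--
--     # Pop for each 'b'
--     while i < n and s[i] == 'b':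
--         if not stack:
--             return False  # More 'b's than 'a's
--         stack.pop()
--         i += 1
--
--     # If stack is empty and all input is consumed, accept
--     return not stack and i == n
-- ===== SOURCE B (Python) =====
-- def is_anbn(s):
--     n = len(s)
--     if n % 2 == 1:
--         return False
--     half = n // 2
--     return all(c == 'a' for c in s[:half]) and all(c == 'b' for c in s[half:])
-- ===== Notes on version B (the rewrite author's own statement) =====
-- stated objective: simpler
-- what changed: Replaces the PDA stack simulation (two while-loops pushing and popping markers) with a length-parity check and a fixed midpoint split: first half must be all 'a', second half all 'b'.
import Mathlib
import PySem

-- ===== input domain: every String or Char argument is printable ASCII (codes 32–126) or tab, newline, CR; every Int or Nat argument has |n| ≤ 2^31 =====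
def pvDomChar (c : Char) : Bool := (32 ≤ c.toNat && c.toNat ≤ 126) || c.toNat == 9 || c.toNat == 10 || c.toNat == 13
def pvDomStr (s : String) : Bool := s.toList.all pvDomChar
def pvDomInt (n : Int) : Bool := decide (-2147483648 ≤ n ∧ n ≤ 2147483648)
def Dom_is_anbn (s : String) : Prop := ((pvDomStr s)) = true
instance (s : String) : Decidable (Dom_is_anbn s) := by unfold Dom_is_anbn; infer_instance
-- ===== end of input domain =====

-- B replaces A's PDA stack simulation by a length-parity check and a fixed midpoint split (simpler).

-- ===== PORT A =====
-- Second while-loop: pop one marker per 'b'; on break, return (not stack and i == n).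
-- (The stack is pushed/popped at the head; Python appends/pops at the end, but the stack
-- only ever holds copies of 'A', so the contents are identical.)
def isAnbnLoop2 : List Char → List Char → Bool
  | c :: r, stack =>
      if c = 'b' then
        match stack with
        | [] => false                    -- more 'b's than 'a's
        | _ :: st => isAnbnLoop2 r st
      else stack.isEmpty && (c :: r).isEmpty
  | [], stack => stack.isEmpty && ([] : List Char).isEmpty

-- First while-loop: push 'A' for each leading 'a', then fall through to loop 2.
def isAnbnLoop1 : List Char → List Char → Bool
  | c :: r, stack =>
      if c = 'a' then isAnbnLoop1 r ('A' :: stack)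
      else isAnbnLoop2 (c :: r) stack
  | [], stack => isAnbnLoop2 [] stack

def is_anbn (s : String) : Bool := isAnbnLoop1 s.toList []

-- ===== PORT B =====
def is_anbn_alt (s : String) : Bool :=
  let l := s.toList
  let n := l.length
  if n % 2 = 1 then false
  else
    let half := n / 2
    (l.take half).all (fun c => c = 'a') && (l.drop half).all (fun c => c = 'b')

-- ===== PRECONDITION & SPEC =====
def Spec_is_anbn (s : String) (out : Bool) : Prop := out = is_anbn_alt s
instance (s : String) (out : Bool) : Decidable (Spec_is_anbn s out) := by unfold Spec_is_anbn; infer_instance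

-- ===== CLAIM (what is proved, stated in full; the proofs are below) =====
def Claim_equal_is_anbn : Prop := ∀ (s : String), Dom_is_anbn s → Spec_is_anbn s (is_anbn s)

-- ===== LEMMAS AND PROOFS =====

theorem loop2_true_iff : ∀ (l st : List Char),
    isAnbnLoop2 l st = true ↔ l = List.replicate st.length 'b' := by
  intro l
  induction l with
  | nil =>
      intro st
      rw [isAnbnLoop2]
      cases st with
      | nil => simp
      | cons x st' => simp [List.replicate_succ]
  | cons c r ih =>
      intro st
      by_cases hc : c = 'b'
      · subst hc
        cases st with
        | nil => simp [isAnbnLoop2]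
        | cons x st' =>
            have h1 : isAnbnLoop2 ('b'::r) (x::st') = isAnbnLoop2 r st' := by
              simp [isAnbnLoop2]
            rw [h1, ih st', List.length_cons, List.replicate_succ]
            simp
      · simp only [isAnbnLoop2, if_neg hc]
        constructor
        · intro h
          rw [List.isEmpty_cons, Bool.and_false] at h
          exact absurd h Bool.false_ne_true
        · intro h
          cases hst : st.length with
          | zero => rw [hst] at h; exact absurd h (by simp)
          | succ k =>
              rw [hst, List.replicate_succ] at h
              exact absurd (List.head_eq_of_cons_eq h) hc

theorem loop1_true_iff : ∀ (l st : List Char),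
    isAnbnLoop1 l st = true ↔
      ∃ k, l = List.replicate k 'a' ++ List.replicate (k + st.length) 'b' := by
  intro l
  induction l with
  | nil =>
      intro st
      rw [isAnbnLoop1, loop2_true_iff]
      constructor
      · intro h
        have hst : st.length = 0 := by
          cases hst' : st.length with
          | zero => rfl
          | succ m => rw [hst', List.replicate_succ] at h; simp at h
        exact ⟨0, by simp [hst]⟩
      · rintro ⟨k, hk⟩
        have hlen := congrArg List.length hk
        simp at hlen
        have hst : st.length = 0 := by omega
        rw [hst]
        simp
  | cons c r ih =>
      intro st
      by_cases hc : c = 'a'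
      · subst hc
        rw [isAnbnLoop1, if_pos rfl, ih]
        simp only [List.length_cons]
        constructor
        · rintro ⟨k, hk⟩
          refine ⟨k + 1, ?_⟩
          have hn : k + 1 + st.length = k + (st.length + 1) := by omega
          rw [List.replicate_succ, List.cons_append, hk, hn]
        · rintro ⟨k, hk⟩
          cases k with
          | zero =>
              rw [List.replicate_zero, List.nil_append] at hk
              cases hst : st.length with
              | zero => simp [hst] at hk
              | succ m =>
                  rw [(by omega : 0 + st.length = st.length), hst,
                      List.replicate_succ] at hk
                  exact absurd (List.head_eq_of_cons_eq hk) (by decide)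
          | succ k' =>
              rw [List.replicate_succ, List.cons_append] at hk
              refine ⟨k', ?_⟩
              have hn : k' + (st.length + 1) = k' + 1 + st.length := by omega
              rw [hn, List.tail_eq_of_cons_eq hk]
      · rw [isAnbnLoop1, if_neg hc, loop2_true_iff]
        constructor
        · intro h; exact ⟨0, by simpa using h⟩
        · rintro ⟨k, hk⟩
          cases k with
          | zero => simpa using hk
          | succ k' =>
              rw [List.replicate_succ, List.cons_append] at hk
              exact absurd (List.head_eq_of_cons_eq hk) hc

theorem alt_true_iff (l : List Char) :
    (if l.length % 2 = 1 then false
     else (l.take (l.length / 2)).all (fun c => c = 'a')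
            && (l.drop (l.length / 2)).all (fun c => c = 'b')) = true
    ↔ ∃ k, l = List.replicate k 'a' ++ List.replicate k 'b' := by
  by_cases hodd : l.length % 2 = 1
  · rw [if_pos hodd]
    constructor
    · intro h; exact absurd h Bool.false_ne_true
    · rintro ⟨k, hk⟩
      have hlen := congrArg List.length hk
      simp at hlen
      omega
  · rw [if_neg hodd]
    have heven : l.length % 2 = 0 := by omega
    constructor
    · intro h
      simp only [Bool.and_eq_true, List.all_eq_true, decide_eq_true_eq] at h
      refine ⟨l.length / 2, ?_⟩
      have hlt : (l.take (l.length / 2)).length = l.length / 2 := by simp; omega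
      have hld : (l.drop (l.length / 2)).length = l.length / 2 := by simp; omega
      have h1 := List.eq_replicate_of_mem (fun b hb => h.1 b hb)
      have h2 := List.eq_replicate_of_mem (fun b hb => h.2 b hb)
      rw [hlt] at h1
      rw [hld] at h2
      conv_lhs => rw [← List.take_append_drop (l.length / 2) l]
      rw [h1, h2]
    · rintro ⟨k, hk⟩
      have hlen : l.length = 2 * k := by
        have := congrArg List.length hk
        simp at this
        omega
      have hhalf : l.length / 2 = k := by omega
      rw [hhalf, hk]
      rw [List.take_append_of_le_length (by simp),
          List.drop_append_of_le_length (by simp)]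
      simp

theorem ports_agree (s : String) : is_anbn s = is_anbn_alt s := by
  rw [Bool.eq_iff_iff, is_anbn, is_anbn_alt]
  rw [loop1_true_iff]
  simpa using (alt_true_iff s.toList).symm

-- ===== VERDICT (by name: the statement is the Claim_ definition above) =====
theorem is_anbn_spec : Claim_equal_is_anbn := by
  intro s _
  unfold Spec_is_anbn
  exact ports_agree s
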